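-- pv_equiv track=rewrite | github.com/Cstyler/Test-tasks-CV-ML-DS | Rakuten_Test_Task/main2.py | solution
-- ===== SOURCE A (Python) =====
-- from typing import List
--
-- def solution(a: List[int]) -> int:
--     def gen_partial_sums():
--         yield 0
--         _sum = 0
--         for i in range(len(a)):
--             _sum += a[i]
--             yield _sum
--
--     partial_sums = sorted(gen_partial_sums())
--     min_abs_slice = min(abs(partial_sums[i] - partial_sums[i - 1]) for i in range(1, len(a) + 1))
--     return min_abs_slice
-- ===== SOURCE B (Python) =====
-- from typing import List
--
-- def solution(a: List[int]) -> int: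
--     def abs_slice_sums():
--         for i in range(len(a)):
--             s = 0
--             for j in range(i, len(a)):
--                 s += a[j]
--                 yield abs(s)
--     return min(abs_slice_sums())
-- ===== Notes on version B (the rewrite author's own statement) =====
-- stated objective: alternative
-- what changed: B enumerates all nonempty contiguous subarrays directly with a double loop keeping a running sum, taking min of abs(sum), instead of A's sort-the-prefix-sums-and-take-min-adjacent-gap algorithm.
import Mathlib
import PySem

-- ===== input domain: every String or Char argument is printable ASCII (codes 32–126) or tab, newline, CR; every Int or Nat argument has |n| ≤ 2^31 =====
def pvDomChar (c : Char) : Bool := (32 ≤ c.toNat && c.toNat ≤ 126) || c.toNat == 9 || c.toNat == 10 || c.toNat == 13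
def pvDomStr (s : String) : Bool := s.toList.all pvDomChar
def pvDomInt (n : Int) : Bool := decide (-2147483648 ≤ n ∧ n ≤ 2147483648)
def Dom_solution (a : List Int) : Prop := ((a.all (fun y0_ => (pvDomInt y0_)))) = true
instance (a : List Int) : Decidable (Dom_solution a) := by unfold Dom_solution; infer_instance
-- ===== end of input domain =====

-- B replaces A's sorted-prefix-sums / min-adjacent-gap algorithm by a direct double-loop
-- enumeration of all nonempty contiguous subarray sums, taking the min of their absolute values.

-- ===== PORT A =====
-- the generator: yield 0, then the running prefix sums
def partialAux : List Int → Int → List Int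
  | [], _ => []
  | x :: xs, s => (s + x) :: partialAux xs (s + x)

def solution (a : List Int) : Int :=
  let partialSums := PySem.List.sorted (0 :: partialAux a 0) (fun x => x) false
  let diffs := (PySem.List.pyRange 1 ((a.length : Int) + 1) 1).map
    (fun i => |PySem.List.pyGetD partialSums i 0 - PySem.List.pyGetD partialSums (i - 1) 0|)
  -- min(...) raises ValueError on an empty generator (a = []); excluded by Pre_solution
  (PySem.List.min? diffs (fun x => x)).getD 0

-- ===== PORT B =====
-- inner loop: running sum s over the rest of the list, yielding abs(s) each step
def altInner : List Int → Int → List Int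
  | [], _ => []
  | x :: xs, s => |s + x| :: altInner xs (s + x)

-- outer loop over start positions (suffixes of a)
def altSums : List Int → List Int
  | [] => []
  | x :: xs => altInner (x :: xs) 0 ++ altSums xs

def solution_alt (a : List Int) : Int :=
  -- min(...) raises ValueError on an empty generator (a = []); excluded by Pre_solution
  (PySem.List.min? (altSums a) (fun x => x)).getD 0

-- ===== PRECONDITION & SPEC =====
-- On the empty list both programs' min(...) raises ValueError, so it is excluded.
def Pre_solution (a : List Int) : Prop := a ≠ []
instance (a : List Int) : Decidable (Pre_solution a) := by unfold Pre_solution; infer_instance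
def pvWitness_solution : List Int := [1, -2]

def Spec_solution (a : List Int) (out : Int) : Prop := out = solution_alt a
instance (a : List Int) (out : Int) : Decidable (Spec_solution a out) := by unfold Spec_solution; infer_instance

-- ===== CLAIM (what is proved, stated in full; the proofs are below) =====
def Claim_equal_solution : Prop := ∀ (a : List Int), Dom_solution a → Pre_solution a → Spec_solution a (solution a)

-- ===== LEMMAS AND PROOFS =====

-- all pairwise absolute differences |y - x| for positions of x before positions of y
def pairAbs : List Int → List Int
  | [] => []
  | x :: xs => xs.map (fun y => |y - x|) ++ pairAbs xs

-- adjacent gaps of a list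
def gaps : List Int → List Int
  | x :: y :: r => |y - x| :: gaps (y :: r)
  | _ => []

theorem partialAux_length (xs : List Int) : ∀ s, (partialAux xs s).length = xs.length := by
  induction xs with
  | nil => intro s; rfl
  | cons x xs ih => intro s; simp [partialAux, ih]

theorem partialAux_shift (xs : List Int) : ∀ s c, partialAux xs (c + s) = (partialAux xs s).map (c + ·) := by
  induction xs with
  | nil => intro s c; rfl
  | cons x xs ih =>
    intro s c
    simp only [partialAux, List.map_cons]
    rw [show c + s + x = c + (s + x) by ring, ih]

theorem altInner_eq (xs : List Int) : ∀ s, altInner xs s = (partialAux xs s).map (fun t => |t|) := by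
  induction xs with
  | nil => intro s; rfl
  | cons x xs ih => intro s; simp [altInner, partialAux, ih]

theorem pairAbs_shift (l : List Int) (c : Int) : pairAbs (l.map (c + ·)) = pairAbs l := by
  induction l with
  | nil => rfl
  | cons x xs ih =>
    simp only [List.map_cons, pairAbs, ih, List.map_map]
    congr 1
    apply List.map_congr_left
    intro y _
    simp [Function.comp]

theorem pairAbs_zero_cons (L : List Int) :
    pairAbs (0 :: L) = L.map (fun t => |t|) ++ pairAbs L := by
  simp [pairAbs]

theorem altSums_eq (a : List Int) : altSums a = pairAbs (0 :: partialAux a 0) := by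
  induction a with
  | nil => rfl
  | cons x xs ih =>
    have hshift : partialAux (x :: xs) 0 = (0 :: partialAux xs 0).map (x + ·) := by
      simp only [partialAux, List.map_cons, zero_add, add_zero]
      have h := partialAux_shift xs 0 x
      rw [add_zero] at h
      rw [h]
    show altInner (x :: xs) 0 ++ altSums xs = pairAbs (0 :: partialAux (x :: xs) 0)
    rw [pairAbs_zero_cons, altInner_eq, ih, hshift, pairAbs_shift]

theorem gaps_length (S : List Int) : (gaps S).length = S.length - 1 := by
  induction S with
  | nil => rfl
  | cons x t ih =>
    cases t with
    | nil => rfl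
    | cons y r => simp [gaps] at ih ⊢; omega

theorem gaps_getElem (S : List Int) : ∀ (k : Nat) (h : k < (gaps S).length),
    (gaps S)[k] = |S.getD (k + 1) 0 - S.getD k 0| := by
  induction S with
  | nil => intro k h; simp [gaps] at h
  | cons x t ih =>
    intro k h
    cases t with
    | nil => simp [gaps] at h
    | cons y r =>
      cases k with
      | zero => simp [gaps]
      | succ k =>
        simp only [gaps] at h ⊢
        rw [List.getElem_cons_succ, ih k (by simpa using h)]
        rfl

-- pyRange 1 (n+1) written out as a mapped List.range, for diffs_eq_gaps
theorem pyRange_one_eq (n : Nat) :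
    PySem.List.pyRange 1 ((n : Int) + 1) 1 = List.map (fun k : Nat => ((k : Int) + 1)) (List.range n) := by
  induction n with
  | zero => decide
  | succ n ih =>
    have h : ((n + 1 : Nat) : Int) + 1 = ((n : Int) + 1) + 1 := by push_cast; ring
    rw [h, PySem.List.pyRange_one_succ_right (by omega), ih, List.range_succ,
      List.map_append, List.map_singleton]

theorem diffs_eq_gaps (S : List Int) (n : Nat) (hlen : S.length = n + 1) :
    (PySem.List.pyRange 1 ((n : Int) + 1) 1).map
      (fun i => |PySem.List.pyGetD S i 0 - PySem.List.pyGetD S (i - 1) 0|) = gaps S := by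
  rw [pyRange_one_eq, List.map_map]
  apply List.ext_getElem
  · simp [gaps_length, hlen]
  · intro k h1 h2
    rw [List.getElem_map, List.getElem_range, Function.comp_apply,
      gaps_getElem S k h2,
      show (k : Int) + 1 - 1 = ((k : Nat) : Int) from by ring,
      show (k : Int) + 1 = ((k + 1 : Nat) : Int) from by push_cast; ring,
      PySem.List.pyGetD_natCast, PySem.List.pyGetD_natCast]

theorem mem_gaps (S : List Int) : ∀ d ∈ gaps S, ∃ x y, [x, y].Sublist S ∧ d = |y - x| := by
  induction S with
  | nil => intro d h; simp [gaps] at h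
  | cons x t ih =>
    cases t with
    | nil => intro d h; simp [gaps] at h
    | cons y r =>
      intro d h
      simp only [gaps, List.mem_cons] at h
      rcases h with h | h
      · exact ⟨x, y, by simp, h⟩
      · obtain ⟨u, v, hs, hd⟩ := ih d h
        exact ⟨u, v, hs.trans (List.sublist_cons_self x (y :: r)), hd⟩

theorem mem_pairAbs_of_sublist {x y : Int} {P : List Int} (h : [x, y].Sublist P) :
    |y - x| ∈ pairAbs P := by
  induction P with
  | nil => simp at h
  | cons b t ih =>
    cases h with
    | cons _ h' => exact List.mem_append_right _ (ih h')
    | cons₂ _ h' =>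
      exact List.mem_append_left _
        (List.mem_map.mpr ⟨y, List.singleton_sublist.mp h', rfl⟩)

theorem mem_pairAbs (P : List Int) : ∀ d ∈ pairAbs P, ∃ x y, [x, y].Sublist P ∧ d = |y - x| := by
  induction P with
  | nil => intro d h; simp [pairAbs] at h
  | cons x xs ih =>
    intro d h
    simp only [pairAbs, List.mem_append, List.mem_map] at h
    rcases h with ⟨y, hy, hd⟩ | h
    · exact ⟨x, y, List.Sublist.cons₂ x (List.singleton_sublist.mpr hy), hd.symm⟩
    · obtain ⟨u, v, hs, hd⟩ := ih d h
      exact ⟨u, v, hs.trans (List.sublist_cons_self x xs), hd⟩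

theorem perm_pair {l : List Int} {a b : Int} (h : l.Perm [a, b]) :
    l = [a, b] ∨ l = [b, a] := by
  obtain ⟨c, d, rfl⟩ := List.length_eq_two.mp h.length_eq
  have hc : c ∈ [a, b] := h.subset (by simp)
  rcases List.mem_pair.mp hc with rfl | rfl
  · left
    have hd : [d].Perm [b] := (List.perm_cons c).mp h
    rw [List.perm_singleton.mp hd]
  · right
    have h2 : [c, d].Perm [c, a] := h.trans (List.Perm.swap c a [])
    have hd : [d].Perm [a] := (List.perm_cons c).mp h2
    rw [List.perm_singleton.mp hd]

theorem gap_le : ∀ (S : List Int), S.Pairwise (· ≤ ·) →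
    ∀ u v : Int, [u, v].Sublist S → ∃ e ∈ gaps S, e ≤ v - u := by
  intro S
  induction S with
  | nil => intro _ u v h; simp at h
  | cons z t ih =>
    intro hp u v h
    cases h with
    | cons _ h' =>
      obtain ⟨e, he, hle⟩ := ih hp.of_cons u v h'
      cases t with
      | nil => simp at h'
      | cons w r => exact ⟨e, List.mem_cons_of_mem _ he, hle⟩
    | cons₂ _ h' =>
      have hv : v ∈ t := List.singleton_sublist.mp h'
      cases t with
      | nil => simp at hv
      | cons w r =>
        refine ⟨|w - z|, List.mem_cons_self, ?_⟩
        have hzw : z ≤ w := (List.pairwise_cons.mp hp).1 w List.mem_cons_self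
        have hwv : w ≤ v := by
          rcases List.mem_cons.mp hv with rfl | hv'
          · exact le_refl _
          · exact (List.pairwise_cons.mp hp.of_cons).1 v hv'
        rw [abs_of_nonneg (by omega)]
        omega

theorem min?_congr_dominates (l m : List Int) (hl : l ≠ []) (hm : m ≠ [])
    (h1 : ∀ d ∈ l, ∃ e ∈ m, e ≤ d) (h2 : ∀ d ∈ m, ∃ e ∈ l, e ≤ d) :
    PySem.List.min? l (fun x => x) = PySem.List.min? m (fun x => x) := by
  cases hpl : PySem.List.min? l (fun x => x) with
  | none => exact absurd ((PySem.List.min?_eq_none_iff l _).mp hpl) hl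
  | some p =>
    cases hqm : PySem.List.min? m (fun x => x) with
    | none => exact absurd ((PySem.List.min?_eq_none_iff m _).mp hqm) hm
    | some q =>
      have hpmin := PySem.List.min?_isMin hpl
      have hqmin := PySem.List.min?_isMin hqm
      obtain ⟨e, hem, he⟩ := h1 p (PySem.List.min?_mem hpl)
      obtain ⟨f, hfl, hf⟩ := h2 q (PySem.List.min?_mem hqm)
      have : p = q := le_antisymm (le_trans (hpmin f hfl) hf) (le_trans (hqmin e hem) he)
      rw [this]

-- ===== VERDICT (by name: the statement is the Claim_ definition above) =====
theorem solution_spec : Claim_equal_solution := by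
  intro a _ hpre
  unfold Spec_solution solution solution_alt
  show (PySem.List.min? ((PySem.List.pyRange 1 ((a.length : Int) + 1) 1).map
    (fun i => |PySem.List.pyGetD (PySem.List.sorted (0 :: partialAux a 0) (fun x => x) false) i 0 -
      PySem.List.pyGetD (PySem.List.sorted (0 :: partialAux a 0) (fun x => x) false) (i - 1) 0|)) (fun x => x)).getD 0
    = (PySem.List.min? (altSums a) (fun x => x)).getD 0
  have hlenS : (PySem.List.sorted (0 :: partialAux a 0) (fun x => x) false).length
      = a.length + 1 := by
    rw [PySem.List.length_sorted]; simp [partialAux_length]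
  rw [diffs_eq_gaps _ a.length hlenS, altSums_eq]
  have hna : 0 < a.length := List.length_pos_of_ne_nil hpre
  congr 1
  apply min?_congr_dominates
  · apply List.ne_nil_of_length_pos
    rw [gaps_length, hlenS]; omega
  · cases a with
    | nil => exact absurd rfl hpre
    | cons x xs => simp [partialAux, pairAbs]
  · intro d hd
    obtain ⟨x, y, hs, rfl⟩ := mem_gaps _ d hd
    have hsub : [x, y].Subperm (0 :: partialAux a 0) :=
      hs.subperm.trans (PySem.List.sorted_perm (0 :: partialAux a 0) (fun x => x) false).subperm
    obtain ⟨l', hperm, hsubP⟩ := hsub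
    rcases perm_pair hperm with rfl | rfl
    · exact ⟨|y - x|, mem_pairAbs_of_sublist hsubP, le_refl _⟩
    · exact ⟨|x - y|, mem_pairAbs_of_sublist hsubP, le_of_eq (abs_sub_comm x y)⟩
  · intro d hd
    obtain ⟨x, y, hs, rfl⟩ := mem_pairAbs _ d hd
    have hsub : [x, y].Subperm (PySem.List.sorted (0 :: partialAux a 0) (fun x => x) false) :=
      hs.subperm.trans (PySem.List.sorted_perm (0 :: partialAux a 0) (fun x => x) false).symm.subperm
    obtain ⟨l', hperm, hsubS⟩ := hsub
    have hp : (PySem.List.sorted (0 :: partialAux a 0) (fun x => x) false).Pairwise (· ≤ ·) :=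
      PySem.List.sorted_pairwise (0 :: partialAux a 0) (fun x => x)
    rcases perm_pair hperm with rfl | rfl
    · obtain ⟨e, he, hle⟩ := gap_le _ hp x y hsubS
      exact ⟨e, he, le_trans hle (le_abs_self _)⟩
    · obtain ⟨e, he, hle⟩ := gap_le _ hp y x hsubS
      exact ⟨e, he, le_trans hle (le_trans (le_abs_self _) (le_of_eq (abs_sub_comm x y)))⟩
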